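-- pv_equiv track=rewrite | github.com/apassan-lepoint/chatbot-hopitaux-backend-st | app/utils/query_detection/specialties.py | detect_general_cancer_query
-- ===== SOURCE A (Python) =====
-- specialty_categories_dict = {
--         "Maternités": ["Accouchements normaux", "Accouchements à risques"],
--         "Cardiologie": ["Angioplastie coronaire", "Cardiologie interventionnelle", "Chirurgie cardiaque adulte", "Chirurgie cardiaque de l’enfant et de l’adolescent", "Infarctus du myocarde", "Insuffisance cardiaque", "Rythmologie"],
--         "Veines et artères": ["Ablation des varices", "Chirurgie des artères", "Chirurgie des carotides", "Hypertension artérielle", "Médecine vasculaire"],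
--         "Orthopédie": ["Arthrose de la main", "Chirurgie de l'épaule", "Chirurgie de la cheville", "Chirurgie du canal carpien", "Chirurgie du dos de l'adulte", "Chirurgie du dos de l'enfant et de l’adolescent", "Chirurgie du pied", "Ligaments du genou", "Prothèse de genou", "Prothèse de hanche"],
--         "Ophtalmologie": ["Cataracte", "Chirurgie de la cornée", "Chirurgie de la rétine", "Glaucome", "Strabisme"],
--         "Gynécologie et cancers de la femme": ["Cancer de l'ovaire", "Cancer de l'utérus", "Cancer du sein", "Endométriose", "Fibrome utérin"],
--         "Appareil digestif": ["Appendicite", "Cancer de l'estomac ou de l'œsophage", "Cancer du côlon ou de l'intestin", "Cancer du foie", "Cancer du pancréas", "Chirurgie de l'obésité", "Chirurgie du rectum", "Hernies de l'abdomen", "Maladies inflammatoires chroniques de l'intestin (MICI)", "Proctologie"],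
--         "Psychiatrie": ["Dépression", "Schizophrénie"],
--         "Urologie": ["Adénome de la prostate", "Calculs urinaires", "Cancer de la prostate", "Cancer de la vessie", "Cancer du rein", "Chirurgie des testicules de l’adulte", "Chirurgie des testicules de l’enfant et de l’adolescent"],
--         "Tête et cou": ["Amygdales et végétations", "Audition", "Cancer ORL", "Chirurgie dentaire et orale de l’adulte", "Chirurgie dentaire et orale de l’enfant et de l’adolescent", "Chirurgie du nez et des sinus", "Chirurgie maxillo-faciale", "Glandes salivaires"],
--         "Neurologie": ["Accidents vasculaires cérébraux", "Epilepsie de l’adulte", "Epilepsie de l’enfant et de l’adolescent", "Maladie de Parkinson"],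
--         "Cancerologie": ["Cancer de la thyroïde", "Cancer des os de l’enfant et de l’adolescent", "Cancer du poumon", "Cancers de la peau", "Chirurgie des cancers osseux de l'adulte", "Chirurgie des sarcomes des tissus mous", "Leucémie de l'adulte", "Leucémie de l'enfant et de l’adolescent", "Lymphome-myélome de l’adulte", "Tumeurs du cerveau de l'adulte"],
--         "Diabète": ["Diabète de l'adulte", "Diabète de l'enfant et de l’adolescent"]
--     }
--
-- def get_all_cancer_specialties():
--     """
--     Extract all cancer-related specialties from the specialty_categories_dict.
--     Excludes surgical procedures and focuses on actual cancer types.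
--
--     Returns:
--         list: List of all cancer-related specialty names
--     """
--     cancer_specialties = []
--
--     # Exclude surgical procedures that contain "cancer" but are not cancer types
--     excluded_terms = ["chirurgie", "surgery", "surgical"]
--
--     for category, specialties in specialty_categories_dict.items():
--         for specialty in specialties:
--             # Check if specialty contains "cancer" (case-insensitive)
--             if "cancer" in specialty.lower():
--                 # Exclude surgical procedures
--                 if not any(excluded_term in specialty.lower() for excluded_term in excluded_terms):
--                     cancer_specialties.append(specialty)
--
--     return cancer_specialties
--
-- def detect_general_cancer_query(message: str) -> bool:
--     """
--     Detect if the user is asking about cancer in general without specifying a particular type.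
--
--     Args:
--         message (str): The user's query message
--
--     Returns:
--         bool: True if this is a general cancer query, False otherwise
--     """
--     message_lower = message.lower().strip()
--
--     # Common ways users might ask about cancer in general in French
--     general_cancer_terms = [
--         "cancer",
--         "cancers",
--         "le cancer",
--         "les cancers",
--         "du cancer",
--         "des cancers",
--         "pour cancer",
--         "pour le cancer",
--         "pour les cancers",
--         "concernant le cancer",
--         "concernant les cancers",
--         "sur le cancer",
--         "sur les cancers",
--         "au niveau du cancer",
--         "au niveau des cancers",
--         "question cancer",
--         "question cancers"
--     ]
--
--     # Check if the message contains general cancer terms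
--     for term in general_cancer_terms:
--         if term in message_lower:
--             # Make sure it's not already a specific cancer type
--             all_cancer_specialties = get_all_cancer_specialties()
--             for specific_cancer in all_cancer_specialties:
--                 if specific_cancer.lower() in message_lower:
--                     return False  # It's a specific cancer, not general
--             return True  # It's a general cancer query
--
--     return False
-- ===== SOURCE B (Python) =====
-- # B: the general-term loop collapses to one "cancer" membership test (every
-- # general term contains "cancer", and "cancer" itself is a term), and the
-- # non-surgical cancer-specialty list is a precomputed lowercase constant
-- # instead of being rebuilt from the category dict on every call.
-- _CANCER_SPECIALTIES_LOWER = [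
--     "cancer de l'ovaire", "cancer de l'utérus", "cancer du sein",
--     "cancer de l'estomac ou de l'œsophage", "cancer du côlon ou de l'intestin",
--     "cancer du foie", "cancer du pancréas",
--     "cancer de la prostate", "cancer de la vessie", "cancer du rein",
--     "cancer orl",
--     "cancer de la thyroïde", "cancer des os de l’enfant et de l’adolescent",
--     "cancer du poumon", "cancers de la peau",
-- ]
--
--
-- def detect_general_cancer_query(message: str) -> bool:
--     message_lower = message.lower().strip()
--     return "cancer" in message_lower and not any(
--         spec in message_lower for spec in _CANCER_SPECIALTIES_LOWER
--     )
-- ===== Notes on version B (the rewrite author's own statement) =====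
-- stated objective: simpler
-- what changed: B collapses A's 17-element general_cancer_terms loop to a single 'cancer' substring test (every general term contains 'cancer' and 'cancer' itself is a term) and replaces the per-call nested rebuild of the cancer-specialty list from the category dict by one precomputed lowercase constant list checked with a negated any().
import Mathlib
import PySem

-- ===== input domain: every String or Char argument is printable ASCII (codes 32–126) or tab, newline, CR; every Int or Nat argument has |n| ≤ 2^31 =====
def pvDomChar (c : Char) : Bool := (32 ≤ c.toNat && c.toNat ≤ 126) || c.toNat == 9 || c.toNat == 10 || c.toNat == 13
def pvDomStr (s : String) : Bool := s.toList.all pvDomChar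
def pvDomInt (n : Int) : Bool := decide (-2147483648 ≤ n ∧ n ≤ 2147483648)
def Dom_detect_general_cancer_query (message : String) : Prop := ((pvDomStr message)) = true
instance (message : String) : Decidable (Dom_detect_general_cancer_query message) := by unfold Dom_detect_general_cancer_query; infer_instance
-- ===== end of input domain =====

-- B collapses A's 17-term loop to one "cancer" substring test and checks a
-- precomputed lowercase specialty constant instead of rebuilding the list from
-- the category dict each call; objective: simpler.

-- ===== PORT A =====
def specialty_categories_dict : List (String × List String) := [
  ("Maternités", ["Accouchements normaux", "Accouchements à risques"]),
  ("Cardiologie", ["Angioplastie coronaire", "Cardiologie interventionnelle", "Chirurgie cardiaque adulte", "Chirurgie cardiaque de l’enfant et de l’adolescent", "Infarctus du myocarde", "Insuffisance cardiaque", "Rythmologie"]),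
  ("Veines et artères", ["Ablation des varices", "Chirurgie des artères", "Chirurgie des carotides", "Hypertension artérielle", "Médecine vasculaire"]),
  ("Orthopédie", ["Arthrose de la main", "Chirurgie de l'épaule", "Chirurgie de la cheville", "Chirurgie du canal carpien", "Chirurgie du dos de l'adulte", "Chirurgie du dos de l'enfant et de l’adolescent", "Chirurgie du pied", "Ligaments du genou", "Prothèse de genou", "Prothèse de hanche"]),
  ("Ophtalmologie", ["Cataracte", "Chirurgie de la cornée", "Chirurgie de la rétine", "Glaucome", "Strabisme"]),
  ("Gynécologie et cancers de la femme", ["Cancer de l'ovaire", "Cancer de l'utérus", "Cancer du sein", "Endométriose", "Fibrome utérin"]),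
  ("Appareil digestif", ["Appendicite", "Cancer de l'estomac ou de l'œsophage", "Cancer du côlon ou de l'intestin", "Cancer du foie", "Cancer du pancréas", "Chirurgie de l'obésité", "Chirurgie du rectum", "Hernies de l'abdomen", "Maladies inflammatoires chroniques de l'intestin (MICI)", "Proctologie"]),
  ("Psychiatrie", ["Dépression", "Schizophrénie"]),
  ("Urologie", ["Adénome de la prostate", "Calculs urinaires", "Cancer de la prostate", "Cancer de la vessie", "Cancer du rein", "Chirurgie des testicules de l’adulte", "Chirurgie des testicules de l’enfant et de l’adolescent"]),
  ("Tête et cou", ["Amygdales et végétations", "Audition", "Cancer ORL", "Chirurgie dentaire et orale de l’adulte", "Chirurgie dentaire et orale de l’enfant et de l’adolescent", "Chirurgie du nez et des sinus", "Chirurgie maxillo-faciale", "Glandes salivaires"]),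
  ("Neurologie", ["Accidents vasculaires cérébraux", "Epilepsie de l’adulte", "Epilepsie de l’enfant et de l’adolescent", "Maladie de Parkinson"]),
  ("Cancerologie", ["Cancer de la thyroïde", "Cancer des os de l’enfant et de l’adolescent", "Cancer du poumon", "Cancers de la peau", "Chirurgie des cancers osseux de l'adulte", "Chirurgie des sarcomes des tissus mous", "Leucémie de l'adulte", "Leucémie de l'enfant et de l’adolescent", "Lymphome-myélome de l’adulte", "Tumeurs du cerveau de l'adulte"]),
  ("Diabète", ["Diabète de l'adulte", "Diabète de l'enfant et de l’adolescent"])]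

def excluded_terms : List String := ["chirurgie", "surgery", "surgical"]

-- literal port of get_all_cancer_specialties: nested accumulation loops
def get_all_cancer_specialties : List String :=
  specialty_categories_dict.foldl (fun acc p =>
    p.2.foldl (fun acc2 specialty =>
      if PySem.Str.isIn "cancer" (PySem.Str.lower specialty) then
        if !(excluded_terms.any (fun t => PySem.Str.isIn t (PySem.Str.lower specialty))) then
          acc2 ++ [specialty]
        else acc2
      else acc2) acc) []

def general_cancer_terms : List String :=
  ["cancer", "cancers", "le cancer", "les cancers", "du cancer", "des cancers",
   "pour cancer", "pour le cancer", "pour les cancers", "concernant le cancer",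
   "concernant les cancers", "sur le cancer", "sur les cancers",
   "au niveau du cancer", "au niveau des cancers", "question cancer", "question cancers"]

-- inner loop of A: returns false as soon as a specific cancer specialty is found in the message
def specLoopA (ml : String) : List String → Bool
  | [] => true
  | s :: rest => if PySem.Str.isIn (PySem.Str.lower s) ml then false else specLoopA ml rest

-- outer loop of A over the general terms, with its early returns
def termLoopA (ml : String) : List String → Bool
  | [] => false
  | t :: rest =>
    if PySem.Str.isIn t ml then specLoopA ml get_all_cancer_specialties
    else termLoopA ml rest

def detect_general_cancer_query (message : String) : Bool :=
  let message_lower := PySem.Str.strip (PySem.Str.lower message)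
  termLoopA message_lower general_cancer_terms

-- ===== PORT B =====
-- Source B's precomputed lowercase constant _CANCER_SPECIALTIES_LOWER
def cancer_specialties_lower : List String :=
  ["cancer de l'ovaire", "cancer de l'utérus", "cancer du sein",
   "cancer de l'estomac ou de l'œsophage", "cancer du côlon ou de l'intestin",
   "cancer du foie", "cancer du pancréas",
   "cancer de la prostate", "cancer de la vessie", "cancer du rein",
   "cancer orl",
   "cancer de la thyroïde", "cancer des os de l’enfant et de l’adolescent",
   "cancer du poumon", "cancers de la peau"]

def detect_general_cancer_query_alt (message : String) : Bool :=
  let message_lower := PySem.Str.strip (PySem.Str.lower message)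
  PySem.Str.isIn "cancer" message_lower &&
    !(cancer_specialties_lower.any (fun spec => PySem.Str.isIn spec message_lower))

-- ===== PRECONDITION & SPEC =====
def Spec_detect_general_cancer_query (message : String) (out : Bool) : Prop := out = detect_general_cancer_query_alt message
instance (message : String) (out : Bool) : Decidable (Spec_detect_general_cancer_query message out) := by unfold Spec_detect_general_cancer_query; infer_instance

-- ===== CLAIM (what is proved, stated in full; the proofs are below) =====
def Claim_equal_detect_general_cancer_query : Prop := ∀ (message : String), Dom_detect_general_cancer_query message → Spec_detect_general_cancer_query message (detect_general_cancer_query message)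

-- ===== LEMMAS AND PROOFS =====

-- lowering A's computed specialty list yields exactly B's constant (closed computation)
set_option maxRecDepth 20000 in
theorem specialties_lower_eq :
    get_all_cancer_specialties.map PySem.Str.lower = cancer_specialties_lower := by rfl

-- A's inner loop is the negated existence test over the lowered list
theorem specLoopA_eq_not_any (ml : String) (L : List String) :
    specLoopA ml L = !((L.map PySem.Str.lower).any (fun s => PySem.Str.isIn s ml)) := by
  induction L with
  | nil => rfl
  | cons s rest ih =>
    show (if PySem.Str.isIn (PySem.Str.lower s) ml then false else specLoopA ml rest) = _
    rw [List.map_cons, List.any_cons, ih]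
    cases PySem.Str.isIn (PySem.Str.lower s) ml <;> simp

-- if some general term occurs in ml, then "cancer" occurs in ml (each term contains "cancer")
theorem isIn_cancer_of_term (ml t : String) (hsub : ("cancer" : String).toList <:+: t.toList)
    (h : PySem.Str.isIn t ml = true) : PySem.Str.isIn "cancer" ml = true := by
  rw [PySem.Str.isIn_iff_infix] at h ⊢
  exact hsub.trans h

-- A's term loop returns false when no term matches
theorem termLoopA_false (ml : String) (L : List String)
    (h : ∀ t ∈ L, PySem.Str.isIn t ml = false) : termLoopA ml L = false := by
  induction L with
  | nil => rfl
  | cons t rest ih =>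
    simp only [termLoopA, h t (List.mem_cons_self ..)]
    exact ih (fun x hx => h x (List.mem_cons_of_mem _ hx))

-- ===== VERDICT (by name: the statement is the Claim_ definition above) =====
theorem detect_general_cancer_query_spec : Claim_equal_detect_general_cancer_query := by
  intro message _
  unfold Spec_detect_general_cancer_query detect_general_cancer_query detect_general_cancer_query_alt
  set ml := PySem.Str.strip (PySem.Str.lower message) with hml
  by_cases h : PySem.Str.isIn "cancer" ml = true
  · -- "cancer" is the first general term: A jumps straight to the specialty check
    simp only [termLoopA, general_cancer_terms, h, if_true, Bool.true_and,
      specLoopA_eq_not_any, specialties_lower_eq]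
  · have h' := Bool.eq_false_iff.mpr h
    have hall : ∀ t ∈ general_cancer_terms, PySem.Str.isIn t ml = false := by
      intro t ht
      have hsub : ("cancer" : String).toList <:+: t.toList := by
        fin_cases ht <;> decide
      cases hc : PySem.Str.isIn t ml
      · rfl
      · exact absurd (isIn_cancer_of_term ml t hsub hc) h
    rw [termLoopA_false ml general_cancer_terms hall]
    show false = (PySem.Str.isIn "cancer" ml && _)
    rw [h']
    rfl
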